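-- pv_equiv track=rewrite | github.com/binhle-uty/shopee_streamlit | src/nlp_preprocess.py | getCommonSequences
-- ===== SOURCE A (Python) =====
-- import itertools
--
-- def getMaxOccurrence(stringsList, key):
--     count = 0
--     for word in stringsList:
--         if key in word:
--             count += 1
--     return count
--
-- def getSubSequences(STR):
--     combs = []
--     result = []
--     for l in range(1, len(STR)+1):
--         combs.append(list(itertools.combinations(STR, l)))
--
--     for c in combs:
--         for t in c:
--             result.append(''.join(t))
--     return result
--
-- def getCommonSequences(S):
--     mainList = []
--     for word in S:
--         temp = getSubSequences(word)
--         mainList.extend(temp)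
--
--     mainList = list(set(mainList))
--     mainList = reversed(sorted(mainList, key=len))
--     mainList = list(filter(None, mainList))
--
--     finalData = dict()
--
--     for alpha in mainList:
--         val = getMaxOccurrence(S, alpha)
--         if val > 0:
--             finalData[alpha] = val
--
--     finalData = {k: v for k, v in sorted(finalData.items(), key=lambda item: item[1], reverse=True)}
--
--     return finalData
-- ===== SOURCE B (Python) =====
-- def getCommonSequences(S):
--     # Keys with a positive substring count are exactly the (distinct, non-empty)
--     # substrings of the words, so enumerate substrings directly instead of all
--     # exponentially many subsequences.
--     subs = {w[i:j] for w in S for i in range(len(w)) for j in range(i + 1, len(w) + 1)}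
--     keys = sorted(subs, key=lambda k: (len(k), k), reverse=True)
--     items = [(k, sum(k in w for w in S)) for k in keys]
--     return dict(sorted(items, key=lambda it: it[1], reverse=True))
-- ===== Notes on version B (the rewrite author's own statement) =====
-- stated objective: alternative
-- what changed: B enumerates each word's distinct substrings directly (exactly the candidates that survive A's count > 0 filter) instead of A's enumeration of all subsequences of every word, then counts and sorts the same way.
import Mathlib
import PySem

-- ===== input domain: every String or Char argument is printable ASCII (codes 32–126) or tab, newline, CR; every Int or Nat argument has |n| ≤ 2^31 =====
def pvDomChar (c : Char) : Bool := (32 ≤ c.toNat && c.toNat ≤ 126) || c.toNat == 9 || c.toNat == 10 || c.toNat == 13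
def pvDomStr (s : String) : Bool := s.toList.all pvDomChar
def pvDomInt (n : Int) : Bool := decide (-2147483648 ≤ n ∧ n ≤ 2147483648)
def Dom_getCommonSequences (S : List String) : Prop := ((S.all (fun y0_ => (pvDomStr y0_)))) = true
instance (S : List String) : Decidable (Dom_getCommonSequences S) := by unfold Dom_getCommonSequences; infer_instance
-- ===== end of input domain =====

-- B enumerates only the distinct substrings (exactly the keys that survive A's count > 0
-- filter) instead of all subsequences of every word — a different candidate enumeration,
-- same result; return value only, no argument is mutated.

-- ===== PORT A =====
-- linear adjacent dedup of an already-sorted list (used to determinize list(set(...)));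
-- written as a foldl so that evaluation is tail-recursive
def dedupStep (acc : List String) (x : String) : List String :=
  match acc with
  | [] => [x]
  | y :: _ => if x = y then acc else x :: acc

def dedupSorted (l : List String) : List String := (l.foldl dedupStep []).reverse

def getMaxOccurrence (stringsList : List String) (key : String) : Int :=
  stringsList.foldl (fun count word => if PySem.Str.isIn key word then count + 1 else count) 0

-- `l` ranges over 1..len(STR), so `l.toNat` is exact; ''.join over a tuple of
-- single characters is String.ofList of that character list (exact).  result.append(x)
-- is ported as cons plus one final reverse so that the exponentially long accumulation
-- stays evaluable (Python's append is O(1); repeated `++ [x]` is not).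
def getSubSequences (STR : String) : List String :=
  let combs : List (List (List Char)) :=
    (PySem.List.pyRange 1 (PySem.Str.len STR + 1)).foldl
      (fun combs l => combs ++ [PySem.List.combinations STR.toList l.toNat]) []
  (combs.foldl (fun result c => c.foldl (fun result t => String.ofList t :: result) result) []).reverse

def getCommonSequences (S : List String) : List (String × Int) :=
  let mainList := S.foldl (fun acc word => acc ++ getSubSequences word) []
  -- list(set(mainList)): Python's set iteration order is unspecified (hash-randomized) and
  -- the returned dict compares order-insensitively; determinized here as code-point
  -- increasing order, computed as a merge sort plus adjacent dedup so that the port can be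
  -- evaluated on the exponentially many candidate strings A generates.
  let mainList2 := dedupSorted (mainList.mergeSort (fun a b => decide (a ≤ b)))
  -- sorted(mainList, key=len) is a stable sort; ported as the stable List.mergeSort with the
  -- same key (identical output; PySem's insertion sort cannot be evaluated at this size).
  let mainList3 := (mainList2.mergeSort
    (fun a b => decide (PySem.Str.len a ≤ PySem.Str.len b))).reverse
  let mainList4 := mainList3.filter (fun s => s ≠ "")
  let finalData : PySem.Dict String Int := mainList4.foldl
    (fun d alpha =>
      let val := getMaxOccurrence S alpha
      if 0 < val then d.insert alpha val else d)
    PySem.Dict.empty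
  let final : PySem.Dict String Int :=
    (PySem.List.sorted finalData.items (fun it => it.2) true).foldl
      (fun d it => d.insert it.1 it.2) PySem.Dict.empty
  final.items

-- ===== PORT B =====
def getCommonSequences_alt (S : List String) : List (String × Int) :=
  let subs := PySem.Set.ofList (S.flatMap (fun w =>
    (PySem.List.pyRange 0 (PySem.Str.len w)).flatMap (fun i =>
      (PySem.List.pyRange (i + 1) (PySem.Str.len w + 1)).map (fun j =>
        PySem.Str.slice w (some i) (some j)))))
  let keys := PySem.List.sorted2 subs (fun k => PySem.Str.len k) (fun k => k) true
  let items := keys.map (fun k =>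
    (k, (S.map (fun w => if PySem.Str.isIn k w then (1 : Int) else 0)).sum))
  let final : PySem.Dict String Int :=
    (PySem.List.sorted items (fun it => it.2) true).foldl
      (fun d it => d.insert it.1 it.2) PySem.Dict.empty
  final.items

-- ===== PRECONDITION & SPEC =====
def Spec_getCommonSequences (S : List String) (out : List (String × Int)) : Prop := out = getCommonSequences_alt S
instance (S : List String) (out : List (String × Int)) : Decidable (Spec_getCommonSequences S out) := by unfold Spec_getCommonSequences; infer_instance

-- ===== CLAIM (what is proved, stated in full; the proofs are below) =====
def Claim_equal_getCommonSequences : Prop := ∀ (S : List String), Dom_getCommonSequences S → Spec_getCommonSequences S (getCommonSequences S)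

-- ===== LEMMAS AND PROOFS =====

-- Strict "(length, code-point) increasing" order both final key sequences follow (reversed).
def SAB (a b : String) : Prop :=
  PySem.Str.len a < PySem.Str.len b ∨ (PySem.Str.len a = PySem.Str.len b ∧ a < b)

lemma SAB_trans {a b c : String} (h1 : SAB a b) (h2 : SAB b c) : SAB a c := by
  unfold SAB at *
  rcases h1 with h1 | ⟨e1, l1⟩ <;> rcases h2 with h2 | ⟨e2, l2⟩
  · exact Or.inl (lt_trans h1 h2)
  · exact Or.inl (e2 ▸ h1)
  · exact Or.inl (e1 ▸ h2)
  · exact Or.inr ⟨e1.trans e2, lt_trans l1 l2⟩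

lemma SAB_total {a b : String} (h : a ≠ b) : SAB a b ∨ SAB b a := by
  unfold SAB
  rcases lt_trichotomy (PySem.Str.len a) (PySem.Str.len b) with h1 | h1 | h1
  · exact Or.inl (Or.inl h1)
  · rcases lt_or_gt_of_ne h with h2 | h2
    · exact Or.inl (Or.inr ⟨h1, h2⟩)
    · exact Or.inr (Or.inr ⟨h1.symm, h2⟩)
  · exact Or.inr (Or.inl h1)

lemma SAB_asymm {a b : String} (h1 : SAB a b) (h2 : SAB b a) : False := by
  unfold SAB at *
  rcases h1 with h1 | ⟨e1, l1⟩ <;> rcases h2 with h2 | ⟨e2, l2⟩ <;> first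
    | exact absurd (lt_trans h1 h2) (lt_irrefl _)
    | exact absurd h1 (by omega)
    | exact absurd h2 (by omega)
    | exact absurd (lt_trans l1 l2) (lt_irrefl _)

-- dedupStep/dedupSorted: membership and strict sortedness
lemma dedupStep_nil (x : String) : dedupStep [] x = [x] := rfl
lemma dedupStep_cons (y : String) (t : List String) (x : String) :
    dedupStep (y :: t) x = if x = y then y :: t else x :: y :: t := rfl

lemma mem_foldl_dedupStep (l : List String) (acc : List String) (x : String) :
    x ∈ l.foldl dedupStep acc ↔ x ∈ acc ∨ x ∈ l := by
  induction l generalizing acc with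
  | nil => simp
  | cons a l ih =>
    rw [List.foldl_cons, ih]
    have : x ∈ dedupStep acc a ↔ x ∈ acc ∨ x = a := by
      match acc with
      | [] => rw [dedupStep_nil]; simp [or_comm]
      | y :: t =>
        rw [dedupStep_cons]
        by_cases h : a = y
        · subst h
          rw [if_pos rfl]
          simp only [List.mem_cons]
          tauto
        · rw [if_neg h]
          simp only [List.mem_cons]
          tauto
    rw [this]
    simp [List.mem_cons]
    tauto

lemma pairwise_foldl_dedupStep (l : List String) (acc : List String)
    (hacc : acc.Pairwise (· > ·)) (hl : l.Pairwise (· ≤ ·))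
    (hcross : ∀ z ∈ acc, ∀ b ∈ l, z ≤ b) :
    (l.foldl dedupStep acc).Pairwise (· > ·) := by
  induction l generalizing acc with
  | nil => exact hacc
  | cons a l ih =>
    rw [List.pairwise_cons] at hl
    refine ih _ ?_ hl.2 ?_
    · match acc, hacc, hcross with
      | [], _, _ => rw [dedupStep_nil]; simp
      | y :: t, hacc, hcross =>
        rw [dedupStep_cons]
        by_cases h : a = y
        · rw [if_pos h]; exact hacc
        · rw [if_neg h]
          rw [List.pairwise_cons] at hacc ⊢
          constructor
          · intro z hz
            rcases List.mem_cons.mp hz with rfl | hz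
            · exact lt_of_le_of_ne (hcross z List.mem_cons_self a List.mem_cons_self) (Ne.symm h)
            · exact lt_of_lt_of_le (hacc.1 z hz) (hcross y List.mem_cons_self a List.mem_cons_self)
          · exact List.pairwise_cons.mpr ⟨hacc.1, hacc.2⟩
    · intro z hz b hb
      have hzmem : z = a ∨ z ∈ acc := by
        match acc, hz with
        | [], hz => rw [dedupStep_nil] at hz; simpa using hz
        | y :: t, hz =>
          rw [dedupStep_cons] at hz
          by_cases h : a = y
          · rw [if_pos h] at hz; exact Or.inr hz
          · rw [if_neg h] at hz
            rcases List.mem_cons.mp hz with rfl | hz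
            · exact Or.inl rfl
            · exact Or.inr hz
      rcases hzmem with rfl | hz'
      · exact hl.1 b hb
      · exact hcross z hz' b (List.mem_cons_of_mem _ hb)

lemma mem_dedupSorted (l : List String) (x : String) : x ∈ dedupSorted l ↔ x ∈ l := by
  rw [dedupSorted, List.mem_reverse, mem_foldl_dedupStep]
  simp

lemma pairwise_dedupSorted (l : List String) (hl : l.Pairwise (· ≤ ·)) :
    (dedupSorted l).Pairwise (· < ·) := by
  rw [dedupSorted, List.pairwise_reverse]
  exact pairwise_foldl_dedupStep l [] List.Pairwise.nil hl (by simp)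

-- stability facts for the stable merge sort by length
lemma pair_sublist_of_pairwise_lt {l : List String} (hl : l.Pairwise (· < ·)) {x y : String}
    (hx : x ∈ l) (hy : y ∈ l) (hxy : x < y) : [x, y].Sublist l := by
  induction l with
  | nil => cases hx
  | cons c t ih =>
    rw [List.pairwise_cons] at hl
    rcases List.mem_cons.mp hx with rfl | hx'
    · rcases List.mem_cons.mp hy with rfl | hy'
      · exact absurd hxy (lt_irrefl _)
      · exact (List.singleton_sublist.mpr hy').cons₂ x
    · rcases List.mem_cons.mp hy with rfl | hy'
      · exact absurd (lt_trans (hl.1 x hx') hxy) (lt_irrefl _)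
      · exact (ih hl.2 hx' hy').cons c

lemma sublist_pair_antisym {α : Type} {l : List α} (hnd : l.Nodup) {x y : α}
    (h1 : [x, y].Sublist l) (h2 : [y, x].Sublist l) : x = y := by
  induction l with
  | nil => cases h1
  | cons c t ih =>
    rw [List.nodup_cons] at hnd
    rcases List.cons_sublist_cons'.mp h1 with h1' | ⟨he1, h1'⟩
    · rcases List.cons_sublist_cons'.mp h2 with h2' | ⟨he2, h2'⟩
      · exact ih hnd.2 h1' h2'
      · subst he2
        exact absurd (h1'.subset (by simp)) hnd.1
    · rcases List.cons_sublist_cons'.mp h2 with h2' | ⟨he2, h2'⟩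
      · subst he1
        exact absurd (h2'.subset (by simp)) hnd.1
      · rw [he1, he2]

lemma lenLe_trans : ∀ (a b c : String),
    (fun a b => decide (PySem.Str.len a ≤ PySem.Str.len b)) a b = true →
    (fun a b => decide (PySem.Str.len a ≤ PySem.Str.len b)) b c = true →
    (fun a b => decide (PySem.Str.len a ≤ PySem.Str.len b)) a c = true := by
  intro a b c h1 h2
  simp only [decide_eq_true_eq] at *
  omega

lemma lenLe_total : ∀ (a b : String),
    ((fun a b => decide (PySem.Str.len a ≤ PySem.Str.len b)) a b ||
     (fun a b => decide (PySem.Str.len a ≤ PySem.Str.len b)) b a) = true := by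
  intro a b
  simp only [Bool.or_eq_true, decide_eq_true_eq]
  omega

-- the stable merge sort by length of a strictly code-point-sorted list is SAB-sorted
lemma mergeSortLen_pairwise (l : List String) (hl : l.Pairwise (· < ·)) :
    (l.mergeSort (fun a b => decide (PySem.Str.len a ≤ PySem.Str.len b))).Pairwise SAB := by
  have hndl : l.Nodup := hl.imp (fun h => ne_of_lt h)
  have hperm := List.mergeSort_perm l (fun a b => decide (PySem.Str.len a ≤ PySem.Str.len b))
  have hnd : (l.mergeSort (fun a b => decide (PySem.Str.len a ≤ PySem.Str.len b))).Nodup :=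
    hperm.nodup_iff.mpr hndl
  have hp := List.pairwise_mergeSort lenLe_trans lenLe_total l
  rw [List.pairwise_iff_forall_sublist]
  intro a b hab
  have hle : PySem.Str.len a ≤ PySem.Str.len b := by
    have := List.pairwise_iff_forall_sublist.mp hp hab
    simpa using this
  have hne : a ≠ b := by
    have := (hab.nodup hnd)
    rw [List.nodup_cons] at this
    exact fun e => this.1 (e ▸ List.mem_cons_self)
  rcases eq_or_lt_of_le hle with heq | hlt
  · rcases lt_or_gt_of_ne hne with h1 | h1
    · exact Or.inr ⟨heq, h1⟩
    · exfalso
      have hmem : a ∈ l ∧ b ∈ l := by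
        constructor <;> [exact hperm.subset (hab.subset (by simp));
          exact hperm.subset (hab.subset (by simp))]
      have hba : [b, a].Sublist l := pair_sublist_of_pairwise_lt hl hmem.2 hmem.1 h1
      have hba' := List.sublist_mergeSort lenLe_trans lenLe_total
        (List.pairwise_cons.mpr ⟨by
            intro z hz
            simp only [List.mem_singleton] at hz
            subst hz
            exact decide_eq_true (by omega),
          List.pairwise_singleton _ _⟩) hba
      exact hne (sublist_pair_antisym hnd hab hba')
  · exact Or.inl hlt

-- B's comparator for sorted(key=lambda k: (len(k), k), reverse=True) decides SAB.
lemma beforeB_iff (a b : String) :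
    ((decide (PySem.Str.len b < PySem.Str.len a) ||
      (!decide (PySem.Str.len a < PySem.Str.len b) && decide (b < a))) = true) ↔ SAB b a := by
  simp only [Bool.or_eq_true, Bool.and_eq_true, Bool.not_eq_true', decide_eq_true_eq,
    decide_eq_false_iff_not, SAB]
  constructor
  · rintro (h | ⟨h1, h2⟩)
    · exact Or.inl h
    · rcases eq_or_lt_of_le (not_lt.mp h1) with h3 | h3
      · exact Or.inr ⟨h3, h2⟩
      · exact Or.inl h3
  · rintro (h | ⟨h1, h2⟩)
    · exact Or.inl h
    · exact Or.inr ⟨by omega, h2⟩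

lemma insertBy_B_pairwise (x : String) (acc : List String)
    (h : acc.Pairwise (fun a b => SAB b a)) (hx : x ∉ acc) :
    (PySem.List.insertBy (fun a b =>
        decide (PySem.Str.len b < PySem.Str.len a) ||
        (!decide (PySem.Str.len a < PySem.Str.len b) && decide (b < a))) x acc).Pairwise
      (fun a b => SAB b a) := by
  induction acc with
  | nil => simp [PySem.List.insertBy]
  | cons y ys ih =>
    rw [List.pairwise_cons] at h
    simp only [PySem.List.insertBy]
    by_cases hb : SAB y x
    · rw [if_pos ((beforeB_iff x y).mpr hb)]
      refine List.Pairwise.cons ?_ (List.Pairwise.cons h.1 h.2)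
      intro z hz
      rcases List.mem_cons.mp hz with rfl | hz
      · exact hb
      · exact SAB_trans (h.1 z hz) hb
    · rw [if_neg (fun hh => hb ((beforeB_iff x y).mp hh))]
      have hxy : x ≠ y := fun e => hx (e ▸ List.mem_cons_self)
      refine List.Pairwise.cons ?_ (ih h.2 (fun hm => hx (List.mem_cons_of_mem _ hm)))
      intro z hz
      rcases (PySem.List.mem_insertBy _ _ _ _).mp hz with rfl | hz
      · rcases SAB_total hxy with h1 | h1
        · exact h1
        · exact absurd h1 hb
      · exact h.1 z hz

lemma sorted2_rev_pairwise (xs : List String) (h : xs.Nodup) :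
    (PySem.List.sorted2 xs (fun k => PySem.Str.len k) (fun k => k) true).Pairwise (fun a b => SAB b a) := by
  have main : ∀ (l acc : List String), acc.Pairwise (fun a b => SAB b a) →
      (∀ b ∈ l, b ∉ acc) → l.Nodup →
      (l.foldl (fun acc x => PySem.List.insertBy (fun a b =>
          decide (PySem.Str.len b < PySem.Str.len a) ||
          (!decide (PySem.Str.len a < PySem.Str.len b) && decide (b < a))) x acc) acc).Pairwise
        (fun a b => SAB b a) := by
    intro l
    induction l with
    | nil => exact fun acc h _ _ => h
    | cons x l ih =>
      intro acc hacc hfresh hnd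
      rw [List.nodup_cons] at hnd
      refine ih _ (insertBy_B_pairwise x acc hacc (hfresh x List.mem_cons_self)) ?_ hnd.2
      intro b hb hmem
      rcases (PySem.List.mem_insertBy _ _ _ _).mp hmem with rfl | hmem
      · exact hnd.1 hb
      · exact hfresh b (List.mem_cons_of_mem _ hb) hmem
  have := main xs [] List.Pairwise.nil (by simp) h
  simpa [PySem.List.sorted2] using this

-- membership characterisation of A's candidate generation
lemma mem_foldl_consMap (c : List (List Char)) (acc : List String) (x : String) :
    x ∈ c.foldl (fun result t => String.ofList t :: result) acc
      ↔ x ∈ acc ∨ x ∈ c.map String.ofList := by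
  induction c generalizing acc with
  | nil => simp
  | cons t c ih =>
    rw [List.foldl_cons, ih]
    simp [List.mem_cons]
    tauto

lemma mem_foldl_outer (combs : List (List (List Char))) (acc : List String) (x : String) :
    x ∈ combs.foldl (fun result c => c.foldl (fun result t => String.ofList t :: result) result) acc
      ↔ x ∈ acc ∨ ∃ c ∈ combs, x ∈ c.map String.ofList := by
  induction combs generalizing acc with
  | nil => simp
  | cons c combs ih =>
    rw [List.foldl_cons, ih, mem_foldl_consMap]
    simp only [List.mem_cons]
    constructor
    · rintro ((h | h) | ⟨d, hd, hx⟩)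
      · exact Or.inl h
      · exact Or.inr ⟨c, Or.inl rfl, h⟩
      · exact Or.inr ⟨d, Or.inr hd, hx⟩
    · rintro (h | ⟨d, (rfl | hd), hx⟩)
      · exact Or.inl (Or.inl h)
      · exact Or.inl (Or.inr hx)
      · exact Or.inr ⟨d, hd, hx⟩

lemma mem_getSubSequences (w k : String) :
    k ∈ getSubSequences w ↔ (k.toList.Sublist w.toList ∧ k ≠ "") := by
  unfold getSubSequences
  simp only [PySem.List.foldl_append_singleton_eq_map, List.nil_append]
  rw [List.mem_reverse, mem_foldl_outer]
  simp only [List.mem_map, PySem.List.mem_pyRange_one, List.not_mem_nil, false_or]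
  constructor
  · rintro ⟨c, ⟨l, ⟨hl1, hl2⟩, rfl⟩, t, ht, rfl⟩
    rw [PySem.List.mem_combinations_iff] at ht
    refine ⟨by simpa using ht.1, ?_⟩
    intro he
    have h0 : t = [] := by
      have := congrArg String.toList he
      simpa using this
    rw [h0] at ht
    simp at ht
    omega
  · rintro ⟨hsub, hne⟩
    have h0 : k.toList ≠ [] := fun he => hne (by
      have := congrArg String.ofList he
      simpa using this)
    have hpos := List.length_pos_iff.mpr h0
    refine ⟨PySem.List.combinations w.toList k.toList.length,
      ⟨(k.toList.length : Int), ⟨by omega, ?_⟩, by simp⟩,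
      ⟨k.toList, PySem.List.mem_combinations_iff _ _ _ |>.mpr ⟨hsub, rfl⟩, by simp⟩⟩
    have := hsub.length_le
    rw [PySem.Str.len_eq]
    omega

-- B's per-word slice ranges produce exactly the non-empty substrings (infixes)
lemma slice_infix_iff (w k : String) :
    (∃ i, (0 ≤ i ∧ i < PySem.Str.len w) ∧ ∃ j, (i + 1 ≤ j ∧ j < PySem.Str.len w + 1) ∧
      PySem.Str.slice w (some i) (some j) = k)
    ↔ (k.toList <:+: w.toList ∧ k ≠ "") := by
  constructor
  · rintro ⟨i, ⟨hi0, hi1⟩, j, ⟨hj0, hj1⟩, rfl⟩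
    have hkl : (PySem.Str.slice w (some i) (some j)).toList
        = (w.toList.drop i.toNat).take (j.toNat - i.toNat) := by
      rw [PySem.Str.toList_slice, PySem.Chars.slice_eq_listSlice]
      rw [show i = ((i.toNat : Nat) : Int) by omega, show j = ((j.toNat : Nat) : Int) by omega]
      rw [PySem.List.slice_natCast]
      have e1 : ((i.toNat : Int)).toNat = i.toNat := by omega
      have e2 : ((j.toNat : Int)).toNat = j.toNat := by omega
      rw [e1, e2]
    rw [PySem.Str.len_eq] at hi1 hj1
    constructor
    · rw [hkl]
      exact ((List.take_prefix _ _).isInfix).trans (List.drop_suffix _ _).isInfix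
    · intro he
      have hpos : 0 < ((w.toList.drop i.toNat).take (j.toNat - i.toNat)).length := by
        rw [List.length_take, List.length_drop]
        omega
      have := congrArg String.toList he
      rw [hkl] at this
      simp only [String.toList_empty] at this
      rw [this] at hpos
      simp at hpos
  · rintro ⟨⟨s, t, hst⟩, hne⟩
    have hk0 : k.toList ≠ [] := fun he => hne (by
      have := congrArg String.ofList he; simpa using this)
    have hkpos : 0 < k.toList.length := List.length_pos_iff.mpr hk0
    have hwlen : w.toList.length = s.length + k.toList.length + t.length := by
      rw [← hst]; simp; omega
    refine ⟨(s.length : Int), ⟨by omega, by rw [PySem.Str.len_eq]; omega⟩,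
      ((s.length + k.toList.length : Nat) : Int), ⟨by push_cast; omega, by rw [PySem.Str.len_eq]; push_cast; omega⟩, ?_⟩
    have : (PySem.Str.slice w (some (s.length : Int)) (some ((s.length + k.toList.length : Nat) : Int))).toList = k.toList := by
      rw [PySem.Str.toList_slice, PySem.Chars.slice_eq_listSlice, PySem.List.slice_natCast]
      rw [← hst, List.append_assoc, List.drop_left]
      have : s.length + k.toList.length - s.length = k.toList.length := by omega
      rw [this, List.take_left]
    have := congrArg String.ofList this
    simpa using this

-- the two count computations agree
lemma counts_eq (S : List String) (k : String) :
    getMaxOccurrence S k = (S.map (fun w => if PySem.Str.isIn k w then (1 : Int) else 0)).sum := by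
  rw [getMaxOccurrence, PySem.List.foldl_count_if, PySem.List.sum_map_ite_one_zero, zero_add]

lemma count_pos_iff (S : List String) (k : String) :
    0 < getMaxOccurrence S k ↔ ∃ w ∈ S, PySem.Str.isIn k w = true := by
  rw [getMaxOccurrence, PySem.List.foldl_count_if, zero_add]
  rw [show ((0 : Int) < (List.countP (fun w => PySem.Str.isIn k w) S : Int)) ↔
      0 < List.countP (fun w => PySem.Str.isIn k w) S by omega]
  rw [List.countP_pos_iff]

-- items of A's conditional-insert dict loop
lemma items_foldl_insertIf (l : List String) (c : String → Int) (d : PySem.Dict String Int)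
    (hfresh : ∀ a ∈ l, d.contains a = false) (hnd : l.Nodup) :
    (l.foldl (fun d k => if 0 < c k then d.insert k (c k) else d) d).items
      = d.items ++ (l.filter (fun k => decide (0 < c k))).map (fun k => (k, c k)) := by
  induction l generalizing d with
  | nil => simp
  | cons a l ih =>
    rw [List.nodup_cons] at hnd
    have hins : (d.insert a (c a)).items = d.items ++ [(a, c a)] := by
      have := PySem.Dict.items_foldl_insert_fresh [a] (fun x => x) (fun _ => c a) d
        (by intro b hb; simp at hb; subst hb; exact hfresh _ List.mem_cons_self) (by simp)
      simpa using this
    have hfresh' : ∀ b ∈ l, (d.insert a (c a)).contains b = false := by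
      intro b hb
      rw [PySem.Dict.contains_insert]
      have : (b == a) = false := by
        simp only [beq_eq_false_iff_ne, ne_eq]
        exact fun e => hnd.1 (e ▸ hb)
      rw [this, hfresh b (List.mem_cons_of_mem _ hb)]
      rfl
    by_cases hc : 0 < c a
    · simp only [List.foldl_cons, if_pos hc, List.filter_cons, decide_eq_true hc]
      rw [ih _ hfresh' hnd.2, hins]
      simp
    · simp only [List.foldl_cons, if_neg hc, List.filter_cons]
      have : (decide (0 < c a)) = false := by simpa using hc
      rw [this]
      simp only [Bool.false_eq_true, if_false]
      exact ih d (fun b hb => hfresh b (List.mem_cons_of_mem _ hb)) hnd.2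

-- ===== VERDICT (by name: the statement is the Claim_ definition above) =====
theorem getCommonSequences_spec : Claim_equal_getCommonSequences := by
  intro S _
  unfold Spec_getCommonSequences
  simp only [getCommonSequences, getCommonSequences_alt]
  -- names for the two key lists
  set mainA : List String := S.foldl (fun acc word => acc ++ getSubSequences word) [] with hmainA
  set M2 : List String := dedupSorted (mainA.mergeSort (fun a b => decide (a ≤ b))) with hM2
  set M4 : List String :=
    ((M2.mergeSort (fun a b => decide (PySem.Str.len a ≤ PySem.Str.len b))).reverse).filter
      (fun s => s ≠ "") with hM4
  set genB : List String := S.flatMap (fun w =>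
    (PySem.List.pyRange 0 (PySem.Str.len w)).flatMap (fun i =>
      (PySem.List.pyRange (i + 1) (PySem.Str.len w + 1)).map (fun j =>
        PySem.Str.slice w (some i) (some j)))) with hgenB
  set KB : List String :=
    PySem.List.sorted2 (PySem.Set.ofList genB) (fun k => PySem.Str.len k) (fun k => k) true with hKB
  -- A's dict-building loop produces the filtered item list
  have hM2le : (mainA.mergeSort (fun a b => decide (a ≤ b))).Pairwise (· ≤ ·) :=
    (List.pairwise_mergeSort (le := fun a b => decide (a ≤ b))
      (by intro a b c h1 h2; simp only [decide_eq_true_eq] at *; exact le_trans h1 h2)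
      (by intro a b; simp only [Bool.or_eq_true, decide_eq_true_eq]; exact le_total a b)
      mainA).imp (fun h => of_decide_eq_true h)
  have hM2lt : M2.Pairwise (· < ·) := pairwise_dedupSorted _ hM2le
  have hM2nd : M2.Nodup := hM2lt.imp (fun h => ne_of_lt h)
  have hM4nd : M4.Nodup := by
    rw [hM4]
    exact (List.nodup_reverse.mpr
      ((List.mergeSort_perm _ _).nodup_iff.mpr hM2nd)).filter _
  have hitems :
      (M4.foldl (fun d alpha =>
          let val := getMaxOccurrence S alpha
          if 0 < val then d.insert alpha val else d)
        (PySem.Dict.empty : PySem.Dict String Int)).items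
      = (M4.filter (fun k => decide (0 < getMaxOccurrence S k))).map
          (fun k => (k, getMaxOccurrence S k)) := by
    have := items_foldl_insertIf M4 (fun k => getMaxOccurrence S k) PySem.Dict.empty
      (fun a _ => rfl) hM4nd
    simpa using this
  rw [hitems]
  -- the two key lists are equal
  have hKA_pw : (M4.filter (fun k => decide (0 < getMaxOccurrence S k))).Pairwise
      (fun a b => SAB b a) := by
    rw [hM4]
    exact ((List.pairwise_reverse.mpr (mergeSortLen_pairwise M2 hM2lt)).filter _).filter _
  have hKB_pw : KB.Pairwise (fun a b => SAB b a) :=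
    sorted2_rev_pairwise _ (PySem.Set.nodup_ofList _)
  have hKAnd : (M4.filter (fun k => decide (0 < getMaxOccurrence S k))).Nodup :=
    hM4nd.filter _
  have hKBnd : KB.Nodup :=
    ((PySem.List.sorted2_perm _ _ _ _).nodup_iff).mpr (PySem.Set.nodup_ofList _)
  have hmem : ∀ k : String,
      k ∈ M4.filter (fun k => decide (0 < getMaxOccurrence S k)) ↔ k ∈ KB := by
    intro k
    rw [List.mem_filter, hM4, List.mem_filter, List.mem_reverse,
      (List.mergeSort_perm _ _).mem_iff, hM2, mem_dedupSorted,
      (List.mergeSort_perm _ _).mem_iff, hmainA,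
      PySem.List.foldl_append_eq_flatMap, List.nil_append, List.mem_flatMap,
      hKB, (PySem.List.sorted2_perm _ _ _ _).mem_iff, PySem.Set.mem_ofList, hgenB,
      List.mem_flatMap]
    simp only [mem_getSubSequences, List.mem_flatMap, List.mem_map,
      PySem.List.mem_pyRange_one, decide_eq_true_eq, ne_eq]
    constructor
    · rintro ⟨⟨⟨w1, hw1, hsub, hne⟩, hne'⟩, hpos⟩
      obtain ⟨w2, hw2, hin⟩ := (count_pos_iff S k).mp hpos
      exact ⟨w2, hw2,
        (slice_infix_iff w2 k).mpr ⟨(PySem.Str.isIn_iff_infix _ _).mp hin, hne⟩⟩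
    · rintro ⟨w, hw, i, hi, j, hj, he⟩
      have hinf : k.toList <:+: w.toList ∧ k ≠ "" :=
        (slice_infix_iff w k).mp ⟨i, ⟨hi.1, hi.2⟩, ⟨j, ⟨hj.1, hj.2⟩, he⟩⟩
      refine ⟨⟨⟨w, hw, hinf.1.sublist, hinf.2⟩, by simpa using hinf.2⟩, ?_⟩
      exact (count_pos_iff S k).mpr ⟨w, hw, (PySem.Str.isIn_iff_infix _ _).mpr hinf.1⟩
  have hperm : (M4.filter (fun k => decide (0 < getMaxOccurrence S k))).Perm KB :=
    (List.perm_ext_iff_of_nodup hKAnd hKBnd).mpr hmem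
  have hkeys : M4.filter (fun k => decide (0 < getMaxOccurrence S k)) = KB :=
    List.Perm.eq_of_pairwise
      (fun a b _ _ h1 h2 => (SAB_asymm h1 h2).elim)
      hKA_pw hKB_pw hperm
  rw [hkeys]
  have hmap : KB.map (fun k => (k, getMaxOccurrence S k))
      = KB.map (fun k => (k, (S.map (fun w => if PySem.Str.isIn k w then (1 : Int) else 0)).sum)) :=
    List.map_congr_left (fun k _ => by rw [counts_eq])
  rw [hmap]
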